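-- pv_equiv track=rewrite | github.com/Bourzguifatimazahra/Bootcamp | week-1/day2/challenge/challengegold.py | decode_matrix
-- ===== SOURCE A (Python) =====
-- def is_alpha(char):
--     return char.isalpha()
--
-- def decode_matrix(matrix):
--     if not matrix or not matrix[0]:
--         return ""
--
--     rows = len(matrix) # nbr element in row
--     cols = len(matrix[0])
--     message = []
--     last_was_alpha = False
--
--     for col in range(cols):
--         for row in range(rows):
--             char = matrix[row][col]
--
--             if is_alpha(char):
--                 if not last_was_alpha and message and message[-1] != ' ':
--                     message.append(' ')
--                 message.append(char)
--                 last_was_alpha = True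
--             else:
--                 last_was_alpha = False
--
--     return ''.join(message).strip() #enlève les espaces au début et à la fin d'une chaîne
-- ===== SOURCE B (Python) =====
-- def decode_matrix(matrix):
--     if not matrix or not matrix[0]:
--         return ""
--     cells = [matrix[r][c] for c in range(len(matrix[0])) for r in range(len(matrix))]
--     words = []
--     i = 0
--     n = len(cells)
--     while i < n:
--         if cells[i].isalpha():
--             j = i
--             while j < n and cells[j].isalpha():
--                 j += 1
--             words.append(''.join(cells[i:j]))
--             i = j
--         else:
--             i += 1
--     return ' '.join(words)
-- ===== Notes on version B (the rewrite author's own statement) =====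
-- stated objective: alternative
-- what changed: B replaces A's single stateful pass (last_was_alpha flag with incremental space insertion and a final strip) by a two-phase pipeline: flatten the matrix into a column-major cell list, group maximal runs of alphabetic cells into words, and join the words with single spaces.
import Mathlib
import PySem

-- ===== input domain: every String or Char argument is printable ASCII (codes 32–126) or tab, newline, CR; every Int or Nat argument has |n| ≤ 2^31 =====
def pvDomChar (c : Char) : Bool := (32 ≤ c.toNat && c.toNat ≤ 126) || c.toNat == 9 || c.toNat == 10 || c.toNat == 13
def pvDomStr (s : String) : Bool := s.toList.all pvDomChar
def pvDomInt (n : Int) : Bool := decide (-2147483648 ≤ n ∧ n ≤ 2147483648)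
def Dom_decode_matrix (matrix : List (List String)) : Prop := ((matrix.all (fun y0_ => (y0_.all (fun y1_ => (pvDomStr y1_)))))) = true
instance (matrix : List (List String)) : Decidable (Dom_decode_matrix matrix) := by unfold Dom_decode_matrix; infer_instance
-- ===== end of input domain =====

-- B restructures A's stateful flag-and-strip pass into flatten (column-major) / group alphabetic runs into words / join with spaces; same cost (objective: alternative).

-- ===== PORT A =====
def decode_matrix (matrix : List (List String)) : String :=
  if matrix.isEmpty || (PySem.List.pyGetD matrix 0 []).isEmpty then ""
  else
    let rows : Int := matrix.length
    let cols : Int := (PySem.List.pyGetD matrix 0 []).length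
    let st :=
      (PySem.List.pyRange 0 cols 1).foldl (fun st col =>
        (PySem.List.pyRange 0 rows 1).foldl (fun st row =>
          let char := PySem.List.pyGetD (PySem.List.pyGetD matrix row []) col ""
          if PySem.Str.strIsalpha char then
            ((if !st.2 && !st.1.isEmpty && (PySem.List.pyGetD st.1 (-1) "" != " ")
              then st.1 ++ [" "] else st.1) ++ [char], true)
          else (st.1, false)) st) (([] : List String), false)
    PySem.Str.strip (PySem.Str.join "" st.1)

-- ===== PORT B =====
-- the grouping while-loops of Source B: take the maximal run of alphabetic cells as one word
def altWords (cells : List String) : List String :=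
  match cells with
  | [] => []
  | c :: rest =>
    if PySem.Str.strIsalpha c then
      PySem.Str.join "" (c :: rest.takeWhile (fun s => PySem.Str.strIsalpha s))
        :: altWords (rest.dropWhile (fun s => PySem.Str.strIsalpha s))
    else altWords rest
termination_by cells.length
decreasing_by
  · exact Nat.lt_succ_of_le (List.length_dropWhile_le _ _)
  · simp

def decode_matrix_alt (matrix : List (List String)) : String :=
  if matrix.isEmpty || (PySem.List.pyGetD matrix 0 []).isEmpty then ""
  else
    let cells :=
      (PySem.List.pyRange 0 ((PySem.List.pyGetD matrix 0 []).length : Int) 1).flatMap (fun c =>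
        (PySem.List.pyRange 0 (matrix.length : Int) 1).map (fun r =>
          PySem.List.pyGetD (PySem.List.pyGetD matrix r []) c ""))
    PySem.Str.join " " (altWords cells)

-- ===== PRECONDITION & SPEC =====
-- Python A raises IndexError when some row is shorter than the first row (matrix[row][col] with col < len(matrix[0])); exactly those inputs are excluded.
def Pre_decode_matrix (matrix : List (List String)) : Prop :=
  ∀ row ∈ matrix, (matrix.headD []).length ≤ row.length
instance (matrix : List (List String)) : Decidable (Pre_decode_matrix matrix) := by unfold Pre_decode_matrix; infer_instance
def pvWitness_decode_matrix : List (List String) := [["a", "b"], ["c", "!"]]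
def Spec_decode_matrix (matrix : List (List String)) (out : String) : Prop := out = decode_matrix_alt matrix
instance (matrix : List (List String)) (out : String) : Decidable (Spec_decode_matrix matrix out) := by unfold Spec_decode_matrix; infer_instance

-- ===== CLAIM (what is proved, stated in full; the proofs are below) =====
def Claim_equal_decode_matrix : Prop := ∀ (matrix : List (List String)), Dom_decode_matrix matrix → Pre_decode_matrix matrix → Spec_decode_matrix matrix (decode_matrix matrix)

-- ===== LEMMAS AND PROOFS =====

-- A's loop body as a step function on (message, last_was_alpha)
def aStep (st : List String × Bool) (char : String) : List String × Bool :=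
  if PySem.Str.strIsalpha char then
    ((if !st.2 && !st.1.isEmpty && (PySem.List.pyGetD st.1 (-1) "" != " ")
      then st.1 ++ [" "] else st.1) ++ [char], true)
  else (st.1, false)

-- the message A appends while scanning L, as a 3-state machine: 0 = nothing yet, 1 = inside a word, 2 = after a word
def delta (m : Nat) : List String → List String
  | [] => []
  | c :: L =>
    if PySem.Str.strIsalpha c then (if m = 2 then [" "] else []) ++ c :: delta 1 L
    else delta (if m = 0 then 0 else 2) L

def jn (l : List String) : List Char := (l.map String.toList).flatten

theorem strIsalpha_ne_space {c : String} (h : PySem.Str.strIsalpha c = true) : c ≠ " " := by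
  intro he; subst he; revert h; decide

theorem foldA : ∀ (L : List String) (msg : List String) (last : Bool),
    (last = true → msg ≠ []) →
    (msg ≠ [] → PySem.List.pyGetD msg (-1) "" ≠ " ") →
    (L.foldl aStep (msg, last)).1 =
      msg ++ delta (if last then 1 else if msg = [] then 0 else 2) L := by
  intro L
  induction L with
  | nil => intro msg last _ _; simp [delta]
  | cons c L ih =>
    intro msg last h1 h2
    by_cases hc : PySem.Chars.strIsalpha c.toList = true
    · have hstep : aStep (msg, last) c =
        ((if !last && !msg.isEmpty && (PySem.List.pyGetD msg (-1) "" != " ")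
          then msg ++ [" "] else msg) ++ [c], true) := by
        simp [aStep, hc]
      have hcnd : (!last && !msg.isEmpty && (PySem.List.pyGetD msg (-1) "" != " ")) =
          (if last then false else if msg = [] then false else true) := by
        by_cases hl : last
        · simp [hl]
        · simp only [Bool.not_eq_true] at hl; subst hl
          by_cases hm : msg = []
          · simp [hm]
          · have := h2 hm
            simp [hm, this, bne_iff_ne]
      set msg' := (if (if last then false else if msg = [] then false else true) = true
          then msg ++ [" "] else msg) ++ [c] with hmsg'
      have hne : msg' ≠ [] := by simp [hmsg']
      have hlastc : PySem.List.pyGetD msg' (-1) "" = c := by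
        rw [hmsg']; exact PySem.List.pyGetD_neg_one_append_singleton _ _ _
      have hcs : c ≠ " " := strIsalpha_ne_space hc
      have hrec := ih msg' true (fun _ => hne) (fun _ => by rw [hlastc]; exact hcs)
      rw [List.foldl_cons, hstep, hcnd, ← hmsg', hrec]
      by_cases hl : last
      · have hm := h1 hl
        simp [delta, hc, hl, hmsg']
      · simp only [Bool.not_eq_true] at hl; subst hl
        by_cases hm : msg = []
        · simp [delta, hc, hm, hmsg']
        · simp [delta, hc, hm, hmsg']
    · simp only [Bool.not_eq_true] at hc
      have hstep : aStep (msg, last) c = (msg, false) := by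
        simp [aStep, hc]
      have hrec := ih msg false (by simp) h2
      rw [List.foldl_cons, hstep, hrec]
      by_cases hl : last
      · have hm := h1 hl
        simp [delta, hc, hl, hm]
      · simp only [Bool.not_eq_true] at hl; subst hl
        by_cases hm : msg = [] <;> simp [delta, hc, hm]

theorem foldl_flatMap {α β γ : Type} (g : β → List α) (f : γ → α → γ) :
    ∀ (I : List β) (init : γ),
      ((I.flatMap g).foldl f init) = I.foldl (fun st i => (g i).foldl f st) init := by
  intro I
  induction I with
  | nil => intro init; rfl
  | cons b I ih => intro init; simp [List.flatMap_cons, List.foldl_append, ih]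

theorem jn_cons (x : String) (l : List String) : jn (x :: l) = x.toList ++ jn l := by
  simp [jn]
theorem jn_append (l l' : List String) : jn (l ++ l') = jn l ++ jn l' := by
  simp [jn]

theorem intercalate_nil_left (xs : List (List Char)) : List.intercalate [] xs = xs.flatten := by
  induction xs with
  | nil => rfl
  | cons a xs ih =>
    cases xs with
    | nil => simp [List.intercalate]
    | cons b ys =>
      simp only [List.intercalate, List.intersperse] at *
      simp_all

theorem toList_join_empty (l : List String) : (PySem.Str.join "" l).toList = jn l := by
  rw [PySem.Str.toList_join]
  simp [PySem.Chars.join, intercalate_nil_left, jn]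

theorem intercalate_space : ∀ (ws : List (List Char)),
    List.intercalate [' '] ws =
      (match ws with | [] => [] | w :: tl => w ++ tl.flatMap (fun v => ' ' :: v)) := by
  intro ws
  induction ws with
  | nil => rfl
  | cons w tl ih =>
    cases tl with
    | nil => simp [List.intercalate]
    | cons v tl' =>
      simp only [List.intercalate, List.intersperse] at *
      simp_all [List.flatMap_cons]

theorem toList_join_space (ws : List String) :
    (PySem.Str.join " " ws).toList =
      (match ws with | [] => [] | w :: tl => w.toList ++ tl.flatMap (fun v => ' ' :: v.toList)) := by
  rw [PySem.Str.toList_join]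
  have h1 : (" " : String).toList = [' '] := rfl
  rw [h1, PySem.Chars.join, intercalate_space]
  cases ws with
  | nil => rfl
  | cons w tl => simp [List.flatMap_map]

theorem altWords_cons_pos {c : String} (L : List String)
    (hc : PySem.Chars.strIsalpha c.toList = true) :
    altWords (c :: L) =
      PySem.Str.join "" (c :: L.takeWhile (fun s => PySem.Str.strIsalpha s))
        :: altWords (L.dropWhile (fun s => PySem.Str.strIsalpha s)) := by
  rw [altWords]; simp [hc]

theorem altWords_cons_neg {c : String} (L : List String)
    (hc : PySem.Chars.strIsalpha c.toList = false) :
    altWords (c :: L) = altWords L := by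
  rw [altWords]; simp [hc]

theorem delta1_eq (L : List String) :
    delta 1 L = L.takeWhile (fun s => PySem.Str.strIsalpha s)
      ++ delta 2 (L.dropWhile (fun s => PySem.Str.strIsalpha s)) := by
  induction L with
  | nil => rfl
  | cons c L ih =>
    by_cases hc : PySem.Chars.strIsalpha c.toList = true
    · simp [delta, hc, ih]
    · simp only [Bool.not_eq_true] at hc
      simp [delta, hc]

theorem delta2_words : ∀ (L : List String),
    jn (delta 2 L) = (altWords L).flatMap (fun w => ' ' :: w.toList) := by
  intro L
  induction hL : L.length using Nat.strong_induction_on generalizing L with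
  | _ n ih =>
  cases L with
  | nil => simp [delta, altWords, jn]
  | cons c L =>
    by_cases hc : PySem.Chars.strIsalpha c.toList = true
    · have hlen : (L.dropWhile (fun s => PySem.Str.strIsalpha s)).length < n := by
        subst hL
        exact Nat.lt_succ_of_le (List.length_dropWhile_le _ _)
      have hrec := ih _ hlen (L.dropWhile (fun s => PySem.Str.strIsalpha s)) rfl
      have hd : delta 2 (c :: L) = " " :: c :: delta 1 L := by simp [delta, hc]
      rw [hd, altWords_cons_pos L hc, List.flatMap_cons, delta1_eq]
      rw [jn_cons, jn_cons, jn_append, hrec, toList_join_empty, jn_cons]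
      simp
    · simp only [Bool.not_eq_true] at hc
      have hlen : L.length < n := by subst hL; simp
      have hrec := ih _ hlen L rfl
      have hd : delta 2 (c :: L) = delta 2 L := by simp [delta, hc]
      rw [hd, altWords_cons_neg L hc, hrec]

theorem delta0_words : ∀ (L : List String),
    jn (delta 0 L) =
      (match altWords L with
       | [] => [] | w :: tl => w.toList ++ tl.flatMap (fun v => ' ' :: v.toList)) := by
  intro L
  induction L with
  | nil => simp [delta, altWords, jn]
  | cons c L ih =>
    by_cases hc : PySem.Chars.strIsalpha c.toList = true
    · have hd : delta 0 (c :: L) = c :: delta 1 L := by simp [delta, hc]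
      rw [hd, altWords_cons_pos L hc]
      rw [jn_cons, delta1_eq, jn_append, delta2_words]
      simp [PySem.Chars.join, intercalate_nil_left, jn]
    · simp only [Bool.not_eq_true] at hc
      have hd : delta 0 (c :: L) = delta 0 L := by simp [delta, hc]
      rw [hd, altWords_cons_neg L hc, ih]

theorem strIsalpha_spec {s : String} (h : PySem.Str.strIsalpha s = true) :
    s.toList ≠ [] ∧ ∀ ch ∈ s.toList, PySem.Chars.isalpha ch = true := by
  simp [PySem.Str.strIsalpha, PySem.Chars.strIsalpha, List.all_eq_true] at h
  exact ⟨fun hl => h.1 (String.toList_inj.mp (show s.toList = "".toList from hl)), h.2⟩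

theorem words_ok : ∀ (L : List String) (w : String), w ∈ altWords L →
    w.toList ≠ [] ∧ ∀ ch ∈ w.toList, PySem.Chars.isalpha ch = true := by
  intro L
  induction hL : L.length using Nat.strong_induction_on generalizing L with
  | _ n ih =>
  cases L with
  | nil => intro w hw; simp [altWords] at hw
  | cons c L =>
    intro w hw
    by_cases hc : PySem.Chars.strIsalpha c.toList = true
    · rw [altWords_cons_pos L hc, List.mem_cons] at hw
      rcases hw with hw | hw
      · subst hw
        rw [toList_join_empty, jn_cons]
        obtain ⟨hne, hal⟩ := strIsalpha_spec hc
        constructor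
        · simp [hne]
        · intro ch hch
          rcases List.mem_append.mp hch with h | h
          · exact hal ch h
          · simp only [jn, List.mem_flatten, List.mem_map] at h
            obtain ⟨l, ⟨s, hs, rfl⟩, hch'⟩ := h
            have := List.mem_takeWhile_imp hs
            exact (strIsalpha_spec this).2 ch hch'
      · have hlen : (L.dropWhile (fun s => PySem.Str.strIsalpha s)).length < n := by
          subst hL; exact Nat.lt_succ_of_le (List.length_dropWhile_le _ _)
        exact ih _ hlen _ rfl w hw
    · simp only [Bool.not_eq_true] at hc
      rw [altWords_cons_neg L hc] at hw
      have hlen : L.length < n := by subst hL; simp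
      exact ih _ hlen L rfl w hw

theorem isalpha_not_space {ch : Char} (h : PySem.Chars.isalpha ch = true) :
    PySem.Chars.isspace ch = false := by
  have hA : ('A' : Char).val.toNat = 65 := by decide
  have hZ : ('Z' : Char).val.toNat = 90 := by decide
  have ha : ('a' : Char).val.toNat = 97 := by decide
  have hz : ('z' : Char).val.toNat = 122 := by decide
  simp only [PySem.Chars.isalpha, PySem.Chars.isupper, PySem.Chars.islower, Bool.or_eq_true,
    Bool.and_eq_true, decide_eq_true_eq, Char.le_def, UInt32.le_iff_toNat_le] at h
  cases hsp : PySem.Chars.isspace ch with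
  | false => rfl
  | true =>
    exfalso
    simp only [PySem.Chars.isspace, Char.toNat, Bool.or_eq_true, Bool.and_eq_true,
      decide_eq_true_eq] at hsp
    rcases h with ⟨h1, h2⟩ | ⟨h1, h2⟩
    · rw [hA] at h1; rw [hZ] at h2; omega
    · rw [ha] at h1; rw [hz] at h2; omega

theorem rev_head : ∀ (l : List Char), l ≠ [] → (∀ c ∈ l, PySem.Chars.isalpha c = true) →
    ∃ ch t, l.reverse = ch :: t ∧ PySem.Chars.isalpha ch = true := by
  intro l hne hal
  cases hr : l.reverse with
  | nil => exact absurd (by simpa using congrArg List.reverse hr) hne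
  | cons ch t =>
    refine ⟨ch, t, rfl, hal ch ?_⟩
    have : ch ∈ l.reverse := by rw [hr]; exact List.mem_cons_self
    simpa using this

theorem M_rev : ∀ (tl : List String) (w : String),
    (w.toList ≠ [] ∧ ∀ c ∈ w.toList, PySem.Chars.isalpha c = true) →
    (∀ v ∈ tl, v.toList ≠ [] ∧ ∀ c ∈ v.toList, PySem.Chars.isalpha c = true) →
    ∃ ch t, (w.toList ++ tl.flatMap (fun v => ' ' :: v.toList)).reverse = ch :: t ∧
      PySem.Chars.isalpha ch = true := by
  intro tl
  induction tl with
  | nil =>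
    intro w hw _
    obtain ⟨hne, hal⟩ := hw
    simpa using rev_head w.toList hne hal
  | cons v tl ih =>
    intro w hw htl
    have hv := htl v (List.mem_cons_self)
    have htl' : ∀ u ∈ tl, u.toList ≠ [] ∧ ∀ c ∈ u.toList, PySem.Chars.isalpha c = true :=
      fun u hu => htl u (List.mem_cons_of_mem _ hu)
    obtain ⟨ch, t, hrev, hch⟩ := ih v hv htl'
    refine ⟨ch, t ++ (w.toList ++ [' ']).reverse, ?_, hch⟩
    have hsplit : w.toList ++ (v :: tl).flatMap (fun u => ' ' :: u.toList) =
        (w.toList ++ [' ']) ++ (v.toList ++ tl.flatMap (fun u => ' ' :: u.toList)) := by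
      simp [List.flatMap_cons]
    rw [hsplit, List.reverse_append, hrev]
    simp

theorem strip_alpha_ends (l : List Char)
    (h1 : ∃ a t, l = a :: t ∧ PySem.Chars.isalpha a = true)
    (h2 : ∃ b r, l.reverse = b :: r ∧ PySem.Chars.isalpha b = true) :
    PySem.Chars.strip l = l := by
  obtain ⟨a, t, rfl, ha⟩ := h1
  obtain ⟨b, r, hrev, hb⟩ := h2
  have hl : PySem.Chars.lstrip (a :: t) = a :: t := by
    simp [PySem.Chars.lstrip, isalpha_not_space ha]
  have hrr : r.reverse ++ [b] = a :: t := by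
    simpa using (congrArg List.reverse hrev).symm
  rw [PySem.Chars.strip, hl, PySem.Chars.rstrip, hrev]
  simp [isalpha_not_space hb, hrr]

-- the two ports flatten the matrix to the same column-major cell list
theorem cells_eq (matrix : List (List String)) (cols : Int) :
    (PySem.List.pyRange 0 cols 1).flatMap (fun c =>
        (PySem.List.pyRange 0 (matrix.length : Int) 1).map (fun r =>
          PySem.List.pyGetD (PySem.List.pyGetD matrix r []) c "")) =
    (PySem.List.pyRange 0 cols 1).flatMap (fun c =>
        matrix.map (fun row => PySem.List.pyGetD row c "")) := by
  have hfn : (fun (c : Int) =>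
      (PySem.List.pyRange 0 (matrix.length : Int) 1).map (fun r =>
        PySem.List.pyGetD (PySem.List.pyGetD matrix r []) c "")) =
      (fun (c : Int) => matrix.map (fun row => PySem.List.pyGetD row c "")) := by
    funext c
    rw [show (fun r => PySem.List.pyGetD (PySem.List.pyGetD matrix r []) c "") =
        ((fun row => PySem.List.pyGetD row c "") ∘ (fun r => PySem.List.pyGetD matrix r []))
        from rfl]
    rw [← List.map_map, PySem.List.map_pyGetD_pyRange_zero' matrix []]
  rw [hfn]

theorem main_eq (matrix : List (List String)) (cols : Int) :
    PySem.Str.strip (PySem.Str.join "" (((PySem.List.pyRange 0 cols 1).foldl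
      (fun st col => (PySem.List.pyRange 0 (matrix.length : Int) 1).foldl
        (fun st row => aStep st (PySem.List.pyGetD (PySem.List.pyGetD matrix row []) col "")) st)
      (([] : List String), false)).1)) =
    PySem.Str.join " " (altWords ((PySem.List.pyRange 0 cols 1).flatMap (fun c =>
      (PySem.List.pyRange 0 (matrix.length : Int) 1).map (fun r =>
        PySem.List.pyGetD (PySem.List.pyGetD matrix r []) c "")))) := by
  rw [cells_eq]
  have hfn : (fun (st : List String × Bool) (col : Int) =>
      (PySem.List.pyRange 0 (matrix.length : Int) 1).foldl
        (fun st row => aStep st (PySem.List.pyGetD (PySem.List.pyGetD matrix row []) col "")) st) =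
      (fun st col => (matrix.map (fun row => PySem.List.pyGetD row col "")).foldl aStep st) := by
    funext st col
    rw [PySem.List.foldl_pyRange_zero_pyGetD' matrix []
      (fun st row => aStep st (PySem.List.pyGetD row col "")) st]
    rw [List.foldl_map]
  rw [hfn, ← foldl_flatMap]
  set cells := (PySem.List.pyRange 0 cols 1).flatMap (fun c =>
      matrix.map (fun row => PySem.List.pyGetD row c "")) with hcells
  have hmsg : (cells.foldl aStep (([] : List String), false)).1 = delta 0 cells := by
    rw [foldA cells [] false (by simp) (by simp)]
    simp
  rw [hmsg]
  apply String.toList_inj.mp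
  have hstrip : ∀ s : String, (PySem.Str.strip s).toList = PySem.Chars.strip s.toList := by
    intro s; simp [PySem.Str.strip]
  rw [hstrip, toList_join_empty, delta0_words, toList_join_space]
  have hAll : ∀ w ∈ altWords cells, w.toList ≠ [] ∧
      ∀ ch ∈ w.toList, PySem.Chars.isalpha ch = true := words_ok cells
  cases hw : altWords cells with
  | nil => simp [PySem.Chars.strip, PySem.Chars.lstrip, PySem.Chars.rstrip]
  | cons w tl =>
    have hwo := hAll w (hw ▸ List.mem_cons_self)
    have htlo : ∀ v ∈ tl, v.toList ≠ [] ∧ ∀ c ∈ v.toList, PySem.Chars.isalpha c = true :=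
      fun v hv => hAll v (hw ▸ List.mem_cons_of_mem _ hv)
    apply strip_alpha_ends
    · obtain ⟨hne, hal⟩ := hwo
      cases hwl : w.toList with
      | nil => exact absurd hwl hne
      | cons a t =>
        exact ⟨a, t ++ tl.flatMap (fun v => ' ' :: v.toList), by simp [hwl],
          hal a (by simp [hwl])⟩
    · exact M_rev tl w hwo htlo

-- ===== VERDICT (by name: the statement is the Claim_ definition above) =====
theorem decode_matrix_spec : Claim_equal_decode_matrix := by
  intro matrix _ _
  unfold Spec_decode_matrix
  by_cases hguard : (matrix.isEmpty || (PySem.List.pyGetD matrix 0 []).isEmpty) = true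
  · simp [decode_matrix, decode_matrix_alt, hguard]
  · simp only [decode_matrix, decode_matrix_alt, hguard, Bool.false_eq_true, if_false]
    exact main_eq matrix _
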